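-- pv_equiv track=rewrite | github.com/ig-rudenko/motr | core/device_control.py | compare_ping_status
-- ===== SOURCE A (Python) =====
-- def compare_ping_status(ping1, ping2, ring_list):
--     check1 = []
--     check2 = []
--
--     for dev in ring_list:
--         for dev_ping1 in ping1:
--             if dev_ping1[0] == dev:
--                 check1.append(dev_ping1)
--         for dev_ping2 in ping2:
--             if dev_ping2[0] == dev:
--                 check2.append(dev_ping2)
--     return check1 == check2
-- ===== SOURCE B (Python) =====
-- def compare_ping_status(ping1, ping2, ring_list):
--     for dev in ring_list:
--         if [p for p in ping1 if p[0] == dev] != [p for p in ping2 if p[0] == dev]: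
--             return False
--     return True
-- ===== Notes on version B (the rewrite author's own statement) =====
-- stated objective: alternative
-- what changed: Instead of materialising the two full concatenated filtered lists and comparing them at the end, B compares the per-device filtered segments one device at a time and short-circuits on the first mismatch; correctness uses that equality of identically-segmented concatenations equals segmentwise equality.
import Mathlib
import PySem

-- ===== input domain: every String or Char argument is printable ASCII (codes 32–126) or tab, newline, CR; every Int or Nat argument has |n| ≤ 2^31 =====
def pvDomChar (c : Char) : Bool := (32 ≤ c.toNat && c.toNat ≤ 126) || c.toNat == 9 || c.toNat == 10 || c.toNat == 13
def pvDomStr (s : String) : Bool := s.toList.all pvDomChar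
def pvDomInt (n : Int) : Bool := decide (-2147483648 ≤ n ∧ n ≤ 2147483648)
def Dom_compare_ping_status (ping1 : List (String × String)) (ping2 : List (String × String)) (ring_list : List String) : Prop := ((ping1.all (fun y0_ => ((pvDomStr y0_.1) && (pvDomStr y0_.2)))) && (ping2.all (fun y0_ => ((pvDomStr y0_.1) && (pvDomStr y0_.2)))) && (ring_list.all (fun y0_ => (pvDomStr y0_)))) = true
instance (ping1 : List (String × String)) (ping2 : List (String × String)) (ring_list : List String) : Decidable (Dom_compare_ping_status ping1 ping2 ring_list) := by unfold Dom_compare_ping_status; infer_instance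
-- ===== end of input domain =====

-- B compares the per-device filtered segments one at a time with early exit, instead of
-- building both full concatenated lists and comparing once at the end (objective: alternative).


-- ===== PORT A =====
-- literal transliteration: accumulate check1/check2 over ring_list, appending matching
-- entries of ping1 / ping2 in order, then compare the two accumulated lists
def compare_ping_status (ping1 : List (String × String)) (ping2 : List (String × String)) (ring_list : List String) : Bool :=
  let cs := ring_list.foldl (fun (acc : List (String × String) × List (String × String)) dev =>
    let c1 := ping1.foldl (fun a dev_ping1 => if dev_ping1.1 == dev then a ++ [dev_ping1] else a) acc.1
    let c2 := ping2.foldl (fun a dev_ping2 => if dev_ping2.1 == dev then a ++ [dev_ping2] else a) acc.2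
    (c1, c2)) ([], [])
  cs.1 == cs.2

-- ===== PORT B =====
-- loop over ring_list; compare the two per-device filtered sublists, return false on first mismatch
def cpsLoop (ping1 : List (String × String)) (ping2 : List (String × String)) : List String → Bool
  | [] => true
  | dev :: rest =>
    if ping1.filter (fun p => p.1 == dev) ≠ ping2.filter (fun p => p.1 == dev) then false
    else cpsLoop ping1 ping2 rest

def compare_ping_status_alt (ping1 : List (String × String)) (ping2 : List (String × String)) (ring_list : List String) : Bool :=
  cpsLoop ping1 ping2 ring_list

-- ===== PRECONDITION & SPEC =====
def Spec_compare_ping_status (ping1 : List (String × String)) (ping2 : List (String × String)) (ring_list : List String) (out : Bool) : Prop := out = compare_ping_status_alt ping1 ping2 ring_list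
instance (ping1 : List (String × String)) (ping2 : List (String × String)) (ring_list : List String) (out : Bool) : Decidable (Spec_compare_ping_status ping1 ping2 ring_list out) := by unfold Spec_compare_ping_status; infer_instance

-- ===== CLAIM (what is proved, stated in full; the proofs are below) =====
def Claim_equal_compare_ping_status : Prop := ∀ (ping1 : List (String × String)) (ping2 : List (String × String)) (ring_list : List String), Dom_compare_ping_status ping1 ping2 ring_list → Spec_compare_ping_status ping1 ping2 ring_list (compare_ping_status ping1 ping2 ring_list)

-- ===== LEMMAS AND PROOFS =====

-- the per-device segment
def cpsSeg (p : List (String × String)) (d : String) : List (String × String) :=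
  p.filter (fun x => x.1 == d)

-- the concatenation A builds
def cpsFlat (p : List (String × String)) (ds : List String) : List (String × String) :=
  ds.flatMap (fun d => cpsSeg p d)

lemma cpsFlat_cons (p : List (String × String)) (d : String) (ds : List String) :
    cpsFlat p (d :: ds) = cpsSeg p d ++ cpsFlat p ds := by
  simp [cpsFlat]

-- A's foldl accumulates exactly the concatenations of segments
lemma cps_foldl_eq (p1 p2 : List (String × String)) (ds : List String)
    (a b : List (String × String)) :
    ds.foldl (fun (acc : List (String × String) × List (String × String)) dev =>
      let c1 := p1.foldl (fun a x => if x.1 == dev then a ++ [x] else a) acc.1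
      let c2 := p2.foldl (fun a x => if x.1 == dev then a ++ [x] else a) acc.2
      (c1, c2)) (a, b) = (a ++ cpsFlat p1 ds, b ++ cpsFlat p2 ds) := by
  induction ds generalizing a b with
  | nil => simp [cpsFlat]
  | cons d ds ih =>
    simp only [List.foldl_cons]
    rw [PySem.List.foldl_append_if_eq_filter, PySem.List.foldl_append_if_eq_filter, ih,
      cpsFlat_cons, cpsFlat_cons]
    simp [cpsSeg, List.append_assoc]

lemma compare_ping_status_eq_decide (p1 p2 : List (String × String)) (ds : List String) :
    compare_ping_status p1 p2 ds = (cpsFlat p1 ds == cpsFlat p2 ds) := by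
  unfold compare_ping_status
  rw [cps_foldl_eq]
  simp

-- filtering a segment by another device's test
lemma cpsSeg_filter (p : List (String × String)) (d d' : String) :
    (cpsSeg p d').filter (fun x => x.1 == d) = if d' = d then cpsSeg p d else [] := by
  by_cases h : d' = d
  · subst h
    simp [cpsSeg, List.filter_filter]
  · simp only [if_neg h]
    rw [List.filter_eq_nil_iff]
    intro x hx
    simp only [cpsSeg, List.mem_filter] at hx
    simp only [beq_iff_eq]
    intro hxd
    exact h (by have := hx.2; simp only [beq_iff_eq] at this; rw [← this, hxd])

-- length of the d-filtered part of the concatenation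
lemma cpsFlat_filter_length (p : List (String × String)) (ds : List String) (d : String) :
    ((cpsFlat p ds).filter (fun x => x.1 == d)).length
      = ds.countP (fun d' => d' == d) * (cpsSeg p d).length := by
  induction ds with
  | nil => simp [cpsFlat]
  | cons d' ds ih =>
    rw [cpsFlat_cons, List.filter_append, List.length_append, ih, List.countP_cons]
    by_cases h : d' = d
    · subst h; simp [cpsSeg_filter, Nat.add_mul]; ring
    · rw [cpsSeg_filter]
      simp [h]

lemma cpsSeg_self_filter (p : List (String × String)) (d : String) :
    (cpsSeg p d).filter (fun x => x.1 == d) = cpsSeg p d := by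
  simp [cpsSeg, List.filter_filter]

-- concatenation equality iff segmentwise equality
lemma cpsFlat_eq_iff (p1 p2 : List (String × String)) (ds : List String) :
    cpsFlat p1 ds = cpsFlat p2 ds ↔ ∀ d ∈ ds, cpsSeg p1 d = cpsSeg p2 d := by
  induction ds with
  | nil => simp [cpsFlat]
  | cons d ds ih =>
    constructor
    · intro h
      rw [cpsFlat_cons, cpsFlat_cons] at h
      -- segment lengths agree, by filtering both sides with the d-test
      have hlen : (cpsSeg p1 d).length = (cpsSeg p2 d).length := by
        have hf := congrArg (fun l => (l.filter (fun x : String × String => x.1 == d)).length) h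
        simp only [List.filter_append, List.length_append, cpsSeg_self_filter,
          cpsFlat_filter_length] at hf
        have hc : 0 < 1 + ds.countP (fun d' => d' == d) := by omega
        have : (1 + ds.countP (fun d' => d' == d)) * (cpsSeg p1 d).length
            = (1 + ds.countP (fun d' => d' == d)) * (cpsSeg p2 d).length := by
          rw [Nat.add_mul, Nat.add_mul]; omega
        exact Nat.eq_of_mul_eq_mul_left hc this
      obtain ⟨h1, h2⟩ := List.append_inj h hlen
      intro x hx
      rcases List.mem_cons.mp hx with rfl | hx
      · exact h1
      · exact (ih.mp h2) x hx
    · intro h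
      rw [cpsFlat_cons, cpsFlat_cons, h d (List.mem_cons_self), ih.mpr (fun x hx => h x (List.mem_cons.mpr (Or.inr hx)))]

-- B's loop decides segmentwise equality
lemma cpsLoop_eq_true_iff (p1 p2 : List (String × String)) (ds : List String) :
    cpsLoop p1 p2 ds = true ↔ ∀ d ∈ ds, cpsSeg p1 d = cpsSeg p2 d := by
  induction ds with
  | nil => simp [cpsLoop]
  | cons d ds ih =>
    simp only [cpsLoop]
    split_ifs with h
    · simp only [false_iff]
      intro hall
      exact h (hall d (List.mem_cons_self))
    · rw [ih]
      rw [not_not] at h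
      constructor
      · intro hall x hx
        rcases List.mem_cons.mp hx with rfl | hx
        · exact h
        · exact hall x hx
      · intro hall x hx
        exact hall x (List.mem_cons.mpr (Or.inr hx))

-- ===== VERDICT (by name: the statement is the Claim_ definition above) =====
theorem compare_ping_status_spec : Claim_equal_compare_ping_status := by
  intro p1 p2 ds _
  unfold Spec_compare_ping_status compare_ping_status_alt
  rw [compare_ping_status_eq_decide]
  rcases hb : cpsLoop p1 p2 ds with _ | _
  · have := (not_iff_not.mpr (cpsLoop_eq_true_iff p1 p2 ds)).mp (by simp [hb])
    simp only [beq_eq_false_iff_ne, ne_eq]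
    rw [cpsFlat_eq_iff]
    exact this
  · have := (cpsLoop_eq_true_iff p1 p2 ds).mp hb
    simp only [beq_iff_eq]
    exact (cpsFlat_eq_iff p1 p2 ds).mpr this
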